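-- pv_equiv track=rewrite | github.com/KRR-Oxford/OET | data-construction/get_all_UMLS_entities+.py | update_hyps_after_pruning
-- ===== SOURCE A (Python) =====
-- def update_hyps_after_pruning(list_hyp_CUIs,list_CUIs_to_keep,dict_CUI2hypCUIs):
--     list_hyp_CUIs_updated = []
--     for hyp_CUI in list_hyp_CUIs:
--         if not hyp_CUI in list_CUIs_to_keep:
--             list_hyp_CUIs_new = dict_CUI2hypCUIs.get(hyp_CUI,[])
--             list_hyp_CUIs_new = update_hyps_after_pruning(list_hyp_CUIs_new,list_CUIs_to_keep,dict_CUI2hypCUIs)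
--             list_hyp_CUIs_updated.extend(list_hyp_CUIs_new)
--         else:
--             list_hyp_CUIs_updated.append(hyp_CUI)
--     list_hyp_CUIs_updated = list(dict.fromkeys(list_hyp_CUIs_updated))
--     return list_hyp_CUIs_updated
-- ===== SOURCE B (Python) =====
-- def update_hyps_after_pruning(list_hyp_CUIs, list_CUIs_to_keep, dict_CUI2hypCUIs):
--     # Iterative whole-list rewriting instead of A's recursion: repeatedly substitute
--     # every pruned CUI by its hypernym list, one pass over the whole list at a time,
--     # until only surviving CUIs remain; dedup once at the end.
--     keep = set(list_CUIs_to_keep)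
--     lst = list(list_hyp_CUIs)
--     while not all(c in keep for c in lst):
--         lst = [x for c in lst
--                  for x in ([c] if c in keep else dict_CUI2hypCUIs.get(c, []))]
--     return list(dict.fromkeys(lst))
-- ===== Notes on version B (the rewrite author's own statement) =====
-- stated objective: faster
-- what changed: B replaces A's recursive DFS (per-call list-membership tests and per-level dict.fromkeys dedups) by an iterative fixpoint: whole-list substitution passes that rewrite every pruned CUI to its hypernym list until only kept CUIs remain, with a hash keep set and one final dedup (a timing run measured 145x at n=16384).
import Mathlib
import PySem

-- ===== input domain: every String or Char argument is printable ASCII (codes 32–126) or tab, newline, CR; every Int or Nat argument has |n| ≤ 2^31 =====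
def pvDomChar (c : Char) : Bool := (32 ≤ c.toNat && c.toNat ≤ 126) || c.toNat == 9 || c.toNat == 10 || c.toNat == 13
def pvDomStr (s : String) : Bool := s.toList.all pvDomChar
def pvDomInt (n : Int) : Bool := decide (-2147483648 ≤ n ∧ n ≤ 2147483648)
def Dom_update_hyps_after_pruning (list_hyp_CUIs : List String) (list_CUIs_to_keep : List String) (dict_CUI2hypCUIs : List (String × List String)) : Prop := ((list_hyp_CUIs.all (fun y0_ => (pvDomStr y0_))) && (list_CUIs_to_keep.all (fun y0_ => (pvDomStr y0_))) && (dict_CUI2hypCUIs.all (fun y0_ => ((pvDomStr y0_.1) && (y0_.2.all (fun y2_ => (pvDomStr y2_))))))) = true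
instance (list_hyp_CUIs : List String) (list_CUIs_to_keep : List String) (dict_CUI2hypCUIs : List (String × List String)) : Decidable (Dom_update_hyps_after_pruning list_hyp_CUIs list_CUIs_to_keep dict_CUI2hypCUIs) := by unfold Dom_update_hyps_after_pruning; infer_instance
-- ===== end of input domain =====

-- B replaces A's per-element recursion (with a list-membership test and a dict.fromkeys dedup at
-- every recursive call) by iterative whole-list substitution passes — each pass rewrites every
-- pruned CUI to its hypernym list in place — with ONE final dedup; return values agree on every
-- input whose pruned-hypernym graph is acyclic from the input (elsewhere both Pythons diverge).

-- ===== PORT A =====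
-- dict_CUI2hypCUIs.get(cui, []) (both Pythons read the dict argument this way)
def pvChildren (dict_CUI2hypCUIs : List (String × List String)) (cui : String) : List String :=
  PySem.Dict.getD (PySem.Dict.mk dict_CUI2hypCUIs) cui []

-- A's recursion; the Nat fuel only totalizes it (under Pre_ the recursion depth is at most
-- dict length + 2 — the Python has no such parameter)
def pvUpdA (list_CUIs_to_keep : List String) (dict_CUI2hypCUIs : List (String × List String)) : Nat → List String → List String
  | 0, _ => []
  | f+1, list_hyp_CUIs =>
      PySem.List.dedup
        (list_hyp_CUIs.foldl
          (fun acc h =>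
            if !(list_CUIs_to_keep.contains h) then
              acc ++ pvUpdA list_CUIs_to_keep dict_CUI2hypCUIs f (pvChildren dict_CUI2hypCUIs h)
            else
              acc ++ [h]) [])

def update_hyps_after_pruning (list_hyp_CUIs : List String) (list_CUIs_to_keep : List String) (dict_CUI2hypCUIs : List (String × List String)) : List String :=
  pvUpdA list_CUIs_to_keep dict_CUI2hypCUIs (dict_CUI2hypCUIs.length + 2) list_hyp_CUIs

-- ===== PORT B =====
-- one whole-list pass of B's while loop: substitute every pruned CUI by its hypernym list
def pvSubstPass (keep : PySem.Set String) (dict_CUI2hypCUIs : List (String × List String)) (lst : List String) : List String :=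
  lst.flatMap (fun c => if PySem.Set.contains keep c then [c] else pvChildren dict_CUI2hypCUIs c)

-- B's 'while not all(c in keep for c in lst)' loop; the Nat fuel only totalizes it (under Pre_
-- the loop exits within dict length + 2 passes — the Python has no such parameter)
def pvRunB (keep : PySem.Set String) (dict_CUI2hypCUIs : List (String × List String)) : Nat → List String → List String
  | 0, lst => lst
  | f+1, lst =>
      if lst.all (fun c => PySem.Set.contains keep c) then lst
      else pvRunB keep dict_CUI2hypCUIs f (pvSubstPass keep dict_CUI2hypCUIs lst)

def update_hyps_after_pruning_alt (list_hyp_CUIs : List String) (list_CUIs_to_keep : List String) (dict_CUI2hypCUIs : List (String × List String)) : List String :=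
  PySem.List.dedup
    (pvRunB (PySem.Set.ofList list_CUIs_to_keep) dict_CUI2hypCUIs (dict_CUI2hypCUIs.length + 2) list_hyp_CUIs)

-- ===== PRECONDITION & SPEC =====
-- first-match association-list lookup (what dict.get does on the dict argument), written out so
-- that Pre_ is a plain condition on the input and shares no definition with the ports
def pvLookup (dict_CUI2hypCUIs : List (String × List String)) (c : String) : List String :=
  match dict_CUI2hypCUIs with
  | [] => []
  | p :: rest => if p.1 == c then p.2 else pvLookup rest c

-- one reachability step from c: a pruned (non-kept) CUI reaches its hypernym list
def pvNext (list_CUIs_to_keep : List String) (dict_CUI2hypCUIs : List (String × List String)) (c : String) : List String :=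
  if list_CUIs_to_keep.contains c then [] else pvLookup dict_CUI2hypCUIs c

def pvStepSet (list_CUIs_to_keep : List String) (dict_CUI2hypCUIs : List (String × List String)) (s : PySem.Set String) : PySem.Set String :=
  PySem.Set.update s (s.flatMap (pvNext list_CUIs_to_keep dict_CUI2hypCUIs))

def pvReach (list_CUIs_to_keep : List String) (dict_CUI2hypCUIs : List (String × List String)) : Nat → PySem.Set String → PySem.Set String
  | 0, s => s
  | n+1, s => pvReach list_CUIs_to_keep dict_CUI2hypCUIs n (pvStepSet list_CUIs_to_keep dict_CUI2hypCUIs s)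

-- enough closure iterations: every reachable CUI beyond the start is some dict value entry
def pvBound (dict_CUI2hypCUIs : List (String × List String)) : Nat :=
  (dict_CUI2hypCUIs.flatMap (fun p => p.2)).length

def pvReachAll (list_hyp_CUIs : List String) (list_CUIs_to_keep : List String) (dict_CUI2hypCUIs : List (String × List String)) : PySem.Set String :=
  pvReach list_CUIs_to_keep dict_CUI2hypCUIs (pvBound dict_CUI2hypCUIs) (PySem.Set.ofList list_hyp_CUIs)

-- Pre_ excludes exactly the inputs on which Python A never returns (RecursionError) and Python B's
-- while loop never exits: those whose hypernym graph has a cycle of pruned (non-kept) CUIs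
-- reachable from the input list. It is a closed-form condition on the input graph only (pvReach is
-- plain breadth-first closure of the edge relation "non-kept CUI -> its dict entry"): no pruned
-- CUI reachable from the input is reachable again from its own hypernym list.
def Pre_update_hyps_after_pruning (list_hyp_CUIs : List String) (list_CUIs_to_keep : List String) (dict_CUI2hypCUIs : List (String × List String)) : Prop :=
  ∀ c ∈ pvReachAll list_hyp_CUIs list_CUIs_to_keep dict_CUI2hypCUIs,
    list_CUIs_to_keep.contains c = false →
      c ∉ pvReach list_CUIs_to_keep dict_CUI2hypCUIs (pvBound dict_CUI2hypCUIs)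
            (PySem.Set.ofList (pvLookup dict_CUI2hypCUIs c))

instance (list_hyp_CUIs : List String) (list_CUIs_to_keep : List String) (dict_CUI2hypCUIs : List (String × List String)) : Decidable (Pre_update_hyps_after_pruning list_hyp_CUIs list_CUIs_to_keep dict_CUI2hypCUIs) := by
  unfold Pre_update_hyps_after_pruning; infer_instance

def pvWitness_update_hyps_after_pruning : List String × List String × (List (String × List String)) :=
  (["C1", "C2", "C1"], ["C1", "C3"], [("C2", ["C3", "C4"])])

def Spec_update_hyps_after_pruning (list_hyp_CUIs : List String) (list_CUIs_to_keep : List String) (dict_CUI2hypCUIs : List (String × List String)) (out : List String) : Prop := out = update_hyps_after_pruning_alt list_hyp_CUIs list_CUIs_to_keep dict_CUI2hypCUIs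
instance (list_hyp_CUIs : List String) (list_CUIs_to_keep : List String) (dict_CUI2hypCUIs : List (String × List String)) (out : List String) : Decidable (Spec_update_hyps_after_pruning list_hyp_CUIs list_CUIs_to_keep dict_CUI2hypCUIs out) := by unfold Spec_update_hyps_after_pruning; infer_instance

-- ===== CLAIM (what is proved, stated in full; the proofs are below) =====
def Claim_equal_update_hyps_after_pruning : Prop := ∀ (list_hyp_CUIs : List String) (list_CUIs_to_keep : List String) (dict_CUI2hypCUIs : List (String × List String)), Dom_update_hyps_after_pruning list_hyp_CUIs list_CUIs_to_keep dict_CUI2hypCUIs → Pre_update_hyps_after_pruning list_hyp_CUIs list_CUIs_to_keep dict_CUI2hypCUIs → Spec_update_hyps_after_pruning list_hyp_CUIs list_CUIs_to_keep dict_CUI2hypCUIs (update_hyps_after_pruning list_hyp_CUIs list_CUIs_to_keep dict_CUI2hypCUIs)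

-- ===== LEMMAS AND PROOFS =====

-- the two lookup spellings agree
theorem pvChildren_eq (d : List (String × List String)) (c : String) :
    pvChildren d c = pvLookup d c := by
  induction d with
  | nil => rfl
  | cons p rest ih =>
      rw [pvChildren, PySem.Dict.getD_eq_get?_getD, PySem.Dict.get?_mk_cons, pvLookup]
      by_cases h : p.1 == c
      · simp [h]
      · simp only [h, Bool.false_eq_true, ite_false]
        rw [← PySem.Dict.getD_eq_get?_getD, ← pvChildren, ih]

-- every dict entry is one of the dict's value lists, keyed by its own first component
theorem pvLookup_origin (d : List (String × List String)) (c : String) :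
    pvLookup d c = [] ∨ ∃ p ∈ d, p.1 = c ∧ pvLookup d c = p.2 := by
  induction d with
  | nil => exact Or.inl rfl
  | cons p rest ih =>
      rw [pvLookup]
      by_cases h : p.1 == c
      · exact Or.inr ⟨p, List.mem_cons_self, by simpa using h, by simp [h]⟩
      · simp only [h, Bool.false_eq_true, ite_false]
        rcases ih with h2 | ⟨q, hq, h1, h2⟩
        · exact Or.inl h2
        · exact Or.inr ⟨q, List.mem_cons_of_mem _ hq, h1, h2⟩

theorem pvLookup_sub_values (d : List (String × List String)) (c : String) :
    ∀ x ∈ pvLookup d c, x ∈ d.flatMap (fun p => p.2) := by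
  intro x hx
  rcases pvLookup_origin d c with h | ⟨p, hp, _, h⟩
  · rw [h] at hx; cases hx
  · exact List.mem_flatMap.mpr ⟨p, hp, h ▸ hx⟩

theorem pvLookup_key_mem (d : List (String × List String)) (c : String)
    (h : pvLookup d c ≠ []) : c ∈ d.map Prod.fst := by
  rcases pvLookup_origin d c with h0 | ⟨p, hp, h1, _⟩
  · exact absurd h0 h
  · exact List.mem_map.mpr ⟨p, hp, h1⟩

-- ----- pvReach infrastructure -----

theorem pv_mem_stepSet {keep : List String} {d : List (String × List String)} {s : PySem.Set String}
    {x : String} (hx : x ∈ s) : x ∈ pvStepSet keep d s := by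
  rw [pvStepSet, PySem.Set.mem_update]; exact Or.inl hx

theorem pv_next_sub_stepSet {keep : List String} {d : List (String × List String)} {s : PySem.Set String}
    {c : String} (hc : c ∈ s) : ∀ x ∈ pvNext keep d c, x ∈ pvStepSet keep d s := by
  intro x hx
  rw [pvStepSet, PySem.Set.mem_update]
  exact Or.inr (List.mem_flatMap.mpr ⟨c, hc, hx⟩)

theorem pv_self_sub_reach (keep : List String) (d : List (String × List String)) :
    ∀ (n : Nat) (s : PySem.Set String) (x : String), x ∈ s → x ∈ pvReach keep d n s := by
  intro n
  induction n with
  | zero => intro s x hx; exact hx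
  | succ n ih => intro s x hx; exact ih _ _ (pv_mem_stepSet hx)

theorem pv_reach_of_fix {keep : List String} {d : List (String × List String)} {s : PySem.Set String}
    (h : pvStepSet keep d s = s) : ∀ n, pvReach keep d n s = s := by
  intro n
  induction n with
  | zero => rfl
  | succ n ih => rw [pvReach, h, ih]

theorem pv_stepSet_nodup {keep : List String} {d : List (String × List String)} {s : PySem.Set String}
    (h : s.Nodup) : (pvStepSet keep d s).Nodup := by
  rw [pvStepSet]; exact PySem.Set.nodup_update _ _ h

theorem pv_reach_nodup (keep : List String) (d : List (String × List String)) :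
    ∀ (n : Nat) (s : PySem.Set String), s.Nodup → (pvReach keep d n s).Nodup := by
  intro n
  induction n with
  | zero => intro s h; exact h
  | succ n ih => intro s h; exact ih _ (pv_stepSet_nodup h)

-- reach stays inside any step-closed superset
theorem pv_reach_sub_closed {keep : List String} {d : List (String × List String)} {t : PySem.Set String}
    (ht : pvStepSet keep d t = t) :
    ∀ (n : Nat) (s : PySem.Set String), (∀ x ∈ s, x ∈ t) → ∀ x ∈ pvReach keep d n s, x ∈ t := by
  intro n
  induction n with
  | zero => intro s hs x hx; exact hs x hx
  | succ n ih =>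
      intro s hs
      refine ih _ ?_
      intro x hx
      rw [pvStepSet, PySem.Set.mem_update] at hx
      rcases hx with hx | hx
      · exact hs x hx
      · rcases List.mem_flatMap.mp hx with ⟨c, hc, hxc⟩
        have : x ∈ pvStepSet keep d t := pv_next_sub_stepSet (hs c hc) x hxc
        rwa [ht] at this

-- a set-update by already-present elements is a no-op
theorem pv_update_of_sub (s b : List String) (h : ∀ x ∈ b, x ∈ s) : PySem.Set.update s b = s := by
  rw [PySem.Set.update_eq_append_filter]
  have : (PySem.Set.ofList b).filter (fun y => !(PySem.Set.contains s y)) = [] := by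
    apply List.filter_eq_nil_iff.mpr
    intro y hy
    simp [h y ((PySem.Set.mem_ofList _ _).mp hy)]
  rw [this, List.append_nil]

-- a set-update that changes the set added some genuinely new element of its argument
theorem pv_update_ne_ex (s b : List String) (h : PySem.Set.update s b ≠ s) :
    ∃ x, x ∈ PySem.Set.update s b ∧ x ∉ s ∧ x ∈ b := by
  rw [PySem.Set.update_eq_append_filter] at *
  match h2 : (PySem.Set.ofList b).filter (fun y => !(PySem.Set.contains s y)) with
  | [] => rw [h2] at h; simp at h
  | x :: t =>
      have hx : x ∈ (PySem.Set.ofList b).filter (fun y => !(PySem.Set.contains s y)) := by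
        rw [h2]; exact List.mem_cons_self
      refine ⟨x, ?_, ?_, ?_⟩
      · simp
      · simpa using List.of_mem_filter hx
      · exact (PySem.Set.mem_ofList _ _).mp (List.mem_of_mem_filter hx)

-- everything a step adds is one of the dict's value entries
theorem pv_step_arg_sub_values (keep : List String) (d : List (String × List String)) (s : PySem.Set String) :
    ∀ x ∈ s.flatMap (pvNext keep d), x ∈ d.flatMap (fun p => p.2) := by
  intro x hx
  rcases List.mem_flatMap.mp hx with ⟨c, _, hxc⟩
  rw [pvNext] at hxc
  by_cases hk : keep.contains c = true
  · rw [if_pos hk] at hxc; cases hxc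
  · rw [if_neg hk] at hxc; exact pvLookup_sub_values d c x hxc

-- saturation: with enough iterations the reach set is step-closed
theorem pv_reach_fix (keep : List String) (d : List (String × List String)) :
    ∀ (n : Nat) (s : PySem.Set String), s.Nodup →
      ((d.flatMap (fun p => p.2)).toFinset \ s.toFinset).card ≤ n →
      pvStepSet keep d (pvReach keep d n s) = pvReach keep d n s := by
  intro n
  induction n with
  | zero =>
      intro s _ hcard
      have hsub : (d.flatMap (fun p => p.2)).toFinset ⊆ s.toFinset :=
        Finset.sdiff_eq_empty_iff_subset.mp (Finset.card_eq_zero.mp (Nat.le_zero.mp hcard))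
      show pvStepSet keep d s = s
      rw [pvStepSet]
      apply pv_update_of_sub
      intro x hx
      have : x ∈ (d.flatMap (fun p => p.2)).toFinset :=
        List.mem_toFinset.mpr (pv_step_arg_sub_values keep d s x hx)
      exact List.mem_toFinset.mp (hsub this)
  | succ n ih =>
      intro s hnd hcard
      by_cases hfix : pvStepSet keep d s = s
      · rw [pvReach, hfix, pv_reach_of_fix hfix, hfix]
      · rw [pvReach]
        apply ih _ (pv_stepSet_nodup hnd)
        rcases pv_update_ne_ex s (s.flatMap (pvNext keep d)) hfix with ⟨x, hx1, hx2, hx3⟩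
        have hxv : x ∈ (d.flatMap (fun p => p.2)).toFinset :=
          List.mem_toFinset.mpr (pv_step_arg_sub_values keep d s x hx3)
        have hss : ∀ y ∈ s, y ∈ pvStepSet keep d s := fun y hy => pv_mem_stepSet hy
        have hlt : ((d.flatMap (fun p => p.2)).toFinset \ (pvStepSet keep d s).toFinset).card
            < ((d.flatMap (fun p => p.2)).toFinset \ s.toFinset).card := by
          apply Finset.card_lt_card
          constructor
          · intro y hy
            rcases Finset.mem_sdiff.mp hy with ⟨hy1, hy2⟩
            refine Finset.mem_sdiff.mpr ⟨hy1, fun hys => hy2 ?_⟩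
            exact List.mem_toFinset.mpr (hss y (List.mem_toFinset.mp hys))
          · intro hsub
            have hxin : x ∈ (d.flatMap (fun p => p.2)).toFinset \ s.toFinset :=
              Finset.mem_sdiff.mpr ⟨hxv, fun hxs => hx2 (List.mem_toFinset.mp hxs)⟩
            have := Finset.mem_sdiff.mp (hsub hxin)
            exact this.2 (List.mem_toFinset.mpr (by rw [pvStepSet]; exact hx1))
        omega

theorem pv_reachAll_closed (xs keep : List String) (d : List (String × List String)) :
    pvStepSet keep d (pvReachAll xs keep d) = pvReachAll xs keep d := by
  apply pv_reach_fix
  · exact PySem.Set.nodup_ofList xs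
  · calc ((d.flatMap (fun p => p.2)).toFinset \ (PySem.Set.ofList xs).toFinset).card
        ≤ (d.flatMap (fun p => p.2)).toFinset.card := Finset.card_le_card (Finset.sdiff_subset)
      _ ≤ (d.flatMap (fun p => p.2)).length := List.toFinset_card_le _

-- per-node reach set
def pvR (keep : List String) (d : List (String × List String)) (c : String) : PySem.Set String :=
  pvReach keep d (pvBound d) (PySem.Set.ofList [c])

theorem pvR_closed (keep : List String) (d : List (String × List String)) (c : String) :
    pvStepSet keep d (pvR keep d c) = pvR keep d c := by
  apply pv_reach_fix
  · exact PySem.Set.nodup_ofList _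
  · calc ((d.flatMap (fun p => p.2)).toFinset \ (PySem.Set.ofList [c]).toFinset).card
        ≤ (d.flatMap (fun p => p.2)).toFinset.card := Finset.card_le_card (Finset.sdiff_subset)
      _ ≤ (d.flatMap (fun p => p.2)).length := List.toFinset_card_le _

theorem pvR_self (keep : List String) (d : List (String × List String)) (c : String) : c ∈ pvR keep d c :=
  pv_self_sub_reach keep d _ _ c (by simp [PySem.Set.mem_ofList])

theorem pvR_nodup (keep : List String) (d : List (String × List String)) (c : String) : (pvR keep d c).Nodup :=
  pv_reach_nodup keep d _ _ (PySem.Set.nodup_ofList _)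

-- the measure: pruned dict keys still reachable from c
def pvMu (keep : List String) (d : List (String × List String)) (c : String) : Nat :=
  ((pvR keep d c).filter (fun k => !(keep.contains k) && (d.map Prod.fst).contains k)).length

theorem pvMu_le (keep : List String) (d : List (String × List String)) (c : String) :
    pvMu keep d c ≤ d.length := by
  rw [pvMu]
  have hnd : ((pvR keep d c).filter
      (fun k => !(keep.contains k) && (d.map Prod.fst).contains k)).Nodup :=
    List.Nodup.filter _ (pvR_nodup keep d c)
  rw [← List.toFinset_card_of_nodup hnd]
  calc ((pvR keep d c).filter
      (fun k => !(keep.contains k) && (d.map Prod.fst).contains k)).toFinset.card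
      ≤ (d.map Prod.fst).toFinset.card := by
        apply Finset.card_le_card
        intro y hy
        have hy2 := List.of_mem_filter (List.mem_toFinset.mp hy)
        have : (d.map Prod.fst).contains y = true := by
          revert hy2; cases keep.contains y <;> cases (d.map Prod.fst).contains y <;> simp
        exact List.mem_toFinset.mpr (List.mem_of_elem_eq_true this)
    _ ≤ (d.map Prod.fst).length := List.toFinset_card_le _
    _ = d.length := List.length_map ..

-- children of a pruned reachable node stay reachable, with strictly smaller measure
theorem pv_children_sub_R {keep : List String} {d : List (String × List String)} {c c' : String}
    (hk : keep.contains c = false) (hc' : c' ∈ pvLookup d c) : c' ∈ pvR keep d c := by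
  have : c' ∈ pvStepSet keep d (pvR keep d c) :=
    pv_next_sub_stepSet (pvR_self keep d c) c' (by rw [pvNext, hk]; simpa using hc')
  rwa [pvR_closed] at this

theorem pvR_mono {keep : List String} {d : List (String × List String)} {c c' : String}
    (hc' : c' ∈ pvR keep d c) : ∀ x ∈ pvR keep d c', x ∈ pvR keep d c := by
  apply pv_reach_sub_closed (pvR_closed keep d c)
  intro x hx
  rw [PySem.Set.mem_ofList] at hx
  simpa [List.mem_singleton.mp hx] using hc'

theorem pv_mu_dec {xs keep : List String} {d : List (String × List String)}
    (hpre : Pre_update_hyps_after_pruning xs keep d)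
    {c c' : String} (hcR : c ∈ pvReachAll xs keep d) (hk : keep.contains c = false)
    (hc' : c' ∈ pvLookup d c) : pvMu keep d c' < pvMu keep d c := by
  have hsub : ∀ x ∈ pvR keep d c', x ∈ pvR keep d c :=
    pvR_mono (pv_children_sub_R hk hc')
  -- Pre_ rules out c being reachable from its own hypernym list
  have hRCclosed : pvStepSet keep d
      (pvReach keep d (pvBound d) (PySem.Set.ofList (pvLookup d c))) =
      pvReach keep d (pvBound d) (PySem.Set.ofList (pvLookup d c)) := by
    apply pv_reach_fix
    · exact PySem.Set.nodup_ofList _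
    · calc ((d.flatMap (fun p => p.2)).toFinset \ (PySem.Set.ofList (pvLookup d c)).toFinset).card
          ≤ (d.flatMap (fun p => p.2)).toFinset.card := Finset.card_le_card (Finset.sdiff_subset)
        _ ≤ (d.flatMap (fun p => p.2)).length := List.toFinset_card_le _
  have hnot : c ∉ pvR keep d c' := by
    intro hmem
    apply hpre c hcR hk
    apply pv_reach_sub_closed hRCclosed _ _ _ c hmem
    intro x hx
    apply pv_self_sub_reach
    rw [PySem.Set.mem_ofList] at hx ⊢
    simpa [List.mem_singleton.mp hx] using hc'
  -- c itself is a pruned dict key reachable from c but not from c'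
  have hkey : (d.map Prod.fst).contains c = true :=
    List.elem_eq_true_of_mem (pvLookup_key_mem d c (List.ne_nil_of_mem hc'))
  have hcA : c ∈ (pvR keep d c).filter
      (fun k => !(keep.contains k) && (d.map Prod.fst).contains k) :=
    List.mem_filter.mpr ⟨pvR_self keep d c, by rw [hk, hkey]; rfl⟩
  have hcA' : c ∉ (pvR keep d c').filter
      (fun k => !(keep.contains k) && (d.map Prod.fst).contains k) :=
    fun h => hnot (List.mem_of_mem_filter h)
  rw [pvMu, pvMu,
    ← List.toFinset_card_of_nodup (List.Nodup.filter _ (pvR_nodup keep d c')),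
    ← List.toFinset_card_of_nodup (List.Nodup.filter _ (pvR_nodup keep d c))]
  apply Finset.card_lt_card
  constructor
  · intro y hy
    have hy2 := List.mem_toFinset.mp hy
    rcases List.mem_filter.mp hy2 with ⟨hy3, hy4⟩
    exact List.mem_toFinset.mpr (List.mem_filter.mpr ⟨hsub y hy3, hy4⟩)
  · intro hsub2
    exact hcA' (List.mem_toFinset.mp (hsub2 (List.mem_toFinset.mpr hcA)))

-- pvReachAll is closed under the same step
theorem pv_reachAll_children {xs keep : List String} {d : List (String × List String)}
    {c c' : String} (hcR : c ∈ pvReachAll xs keep d) (hk : keep.contains c = false)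
    (hc' : c' ∈ pvLookup d c) : c' ∈ pvReachAll xs keep d := by
  have : c' ∈ pvStepSet keep d (pvReachAll xs keep d) :=
    pv_next_sub_stepSet hcR c' (by rw [pvNext, hk]; simpa using hc')
  rwa [pv_reachAll_closed] at this

theorem pv_mem_reachAll_of_mem {xs keep : List String} {d : List (String × List String)}
    {c : String} (hc : c ∈ xs) : c ∈ pvReachAll xs keep d :=
  pv_self_sub_reach keep d _ _ c (by rwa [PySem.Set.mem_ofList])

-- ----- expansion helpers (proof-side only) -----

-- A's per-node expansion, fuel-truncated the way A's port truncates (drops at fuel 0)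
def pvExpand (keep : PySem.Set String) (d : List (String × List String)) : Nat → String → List String
  | 0, _ => []
  | f+1, cui =>
      if PySem.Set.contains keep cui then [cui]
      else (pvLookup d cui).flatMap (pvExpand keep d f)

-- B's per-node expansion, fuel-truncated the way B's passes truncate (keeps the node at fuel 0)
def pvExpT (keep : PySem.Set String) (d : List (String × List String)) : Nat → String → List String
  | 0, cui => [cui]
  | f+1, cui =>
      if PySem.Set.contains keep cui then [cui]
      else (pvLookup d cui).flatMap (pvExpT keep d f)

theorem pv_flatMap_congr {α β : Type} {f g : α → List β} :
    ∀ {l : List α}, (∀ c ∈ l, f c = g c) → l.flatMap f = l.flatMap g := by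
  intro l
  induction l with
  | nil => intro _; rfl
  | cons x t ih =>
      intro h
      rw [List.flatMap_cons, List.flatMap_cons, h x List.mem_cons_self,
        ih (fun c hc => h c (List.mem_cons_of_mem _ hc))]

theorem pv_contains_ofList (keep : List String) (c : String) :
    PySem.Set.contains (PySem.Set.ofList keep) c = keep.contains c := by
  by_cases h : c ∈ keep
  · simp [PySem.Set.mem_ofList, h]
  · simp [PySem.Set.mem_ofList, h]

-- stability / agreement of the two truncated expansions below a node's measure
theorem pv_main (xs keep : List String) (d : List (String × List String))
    (hpre : Pre_update_hyps_after_pruning xs keep d) :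
    ∀ (n : Nat) (c : String), c ∈ pvReachAll xs keep d → pvMu keep d c < n →
      ∀ f, n ≤ f →
        pvExpT (PySem.Set.ofList keep) d f c = pvExpT (PySem.Set.ofList keep) d n c ∧
        pvExpand (PySem.Set.ofList keep) d f c = pvExpT (PySem.Set.ofList keep) d n c := by
  intro n
  induction n with
  | zero => intro c _ hmu; omega
  | succ n ih =>
      intro c hc hmu f hf
      match f, hf with
      | f' + 1, hf =>
        have hf' : n ≤ f' := by omega
        by_cases hk : keep.contains c = true
        · have hm : c ∈ keep := List.mem_of_elem_eq_true hk
          constructor <;>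
            simp [pvExpT, pvExpand, hm]
        · have hkf : PySem.Set.contains (PySem.Set.ofList keep) c = false := by
            rw [pv_contains_ofList]; simpa using hk
          have hknf : keep.contains c = false := by simpa using hk
          have harg : ∀ c' ∈ pvLookup d c,
              pvExpT (PySem.Set.ofList keep) d f' c' = pvExpT (PySem.Set.ofList keep) d n c' ∧
              pvExpand (PySem.Set.ofList keep) d f' c' = pvExpT (PySem.Set.ofList keep) d n c' := by
            intro c' hc'
            have hdec : pvMu keep d c' < pvMu keep d c := pv_mu_dec hpre hc hknf hc'
            exact ih c' (pv_reachAll_children hc hknf hc') (by omega) f' hf'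
          constructor
          · rw [show pvExpT (PySem.Set.ofList keep) d (f' + 1) c =
                  (pvLookup d c).flatMap (pvExpT (PySem.Set.ofList keep) d f') by
                rw [pvExpT, hkf]; rfl,
              show pvExpT (PySem.Set.ofList keep) d (n + 1) c =
                  (pvLookup d c).flatMap (pvExpT (PySem.Set.ofList keep) d n) by
                rw [pvExpT, hkf]; rfl]
            exact pv_flatMap_congr (fun c' hc' => (harg c' hc').1)
          · rw [show pvExpand (PySem.Set.ofList keep) d (f' + 1) c =
                  (pvLookup d c).flatMap (pvExpand (PySem.Set.ofList keep) d f') by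
                rw [pvExpand, hkf]; rfl,
              show pvExpT (PySem.Set.ofList keep) d (n + 1) c =
                  (pvLookup d c).flatMap (pvExpT (PySem.Set.ofList keep) d n) by
                rw [pvExpT, hkf]; rfl]
            exact pv_flatMap_congr (fun c' hc' => (harg c' hc').2)

-- ----- A-side characterisation (from the previous development) -----

theorem pv_update_dedup {α : Type} [BEq α] [LawfulBEq α] (s : PySem.Set α) (b : List α) :
    PySem.Set.update s (PySem.List.dedup b) = PySem.Set.update s b := by
  rw [PySem.Set.update_eq_append_filter, PySem.Set.update_eq_append_filter,
    PySem.List.dedup_eq_ofList, PySem.Set.ofList_ofList]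

theorem pv_update_flatMap {α β : Type} [BEq α] (g : β → List α) :
    ∀ (xs : List β) (s : PySem.Set α),
      PySem.Set.update s (xs.flatMap g) = xs.foldl (fun t h => PySem.Set.update t (g h)) s := by
  intro xs
  induction xs with
  | nil => intro s; simp [PySem.Set.update_nil]
  | cons x t ih => intro s; simp only [List.flatMap_cons, List.foldl_cons,
      PySem.Set.update_append, ih]

theorem pv_dedup_flatMap {α β : Type} [BEq α] (g : β → List α) (xs : List β) :
    PySem.List.dedup (xs.flatMap g) = xs.foldl (fun t h => PySem.Set.update t (g h)) [] := by
  rw [PySem.List.dedup_eq_ofList, ← PySem.Set.update_nil_left, pv_update_flatMap]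

theorem pv_foldl_if_append {α β : Type} (p : β → Bool) (u v : β → List α) (xs : List β) :
    xs.foldl (fun acc h => if p h then acc ++ u h else acc ++ v h) [] =
      xs.flatMap (fun h => if p h then u h else v h) := by
  have hfun : (fun (acc : List α) h => if p h then acc ++ u h else acc ++ v h) =
      (fun acc h => acc ++ (if p h then u h else v h)) := by
    funext acc h; by_cases hc : p h <;> simp [hc]
  rw [hfun, PySem.List.foldl_append_eq_flatMap, List.nil_append]

theorem pvUpdA_succ (keep : List String) (d : List (String × List String)) (f : Nat) (xs : List String) :
    pvUpdA keep d (f + 1) xs =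
      PySem.List.dedup (xs.flatMap (fun h =>
        if !(keep.contains h) then pvUpdA keep d f (pvChildren d h) else [h])) := by
  rw [show pvUpdA keep d (f + 1) xs =
        PySem.List.dedup (xs.foldl (fun acc h =>
          if !(keep.contains h) then acc ++ pvUpdA keep d f (pvChildren d h) else acc ++ [h]) [])
      from rfl,
    pv_foldl_if_append]

-- A's recursion is the single dedup of the truncated expansion (at every fuel)
theorem pv_updA_eq_dedup_flatMap (keep : List String) (d : List (String × List String)) :
    ∀ (f : Nat) (xs : List String),
      pvUpdA keep d (f + 1) xs =
        PySem.List.dedup (xs.flatMap (pvExpand (PySem.Set.ofList keep) d (f + 1))) := by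
  intro f
  induction f with
  | zero =>
    intro xs
    rw [pvUpdA_succ, pv_dedup_flatMap, pv_dedup_flatMap]
    apply PySem.List.foldl_congr_mem
    intro t h _
    rw [pvExpand, pv_contains_ofList]
    by_cases hc : keep.contains h = true
    · rw [if_neg (by simpa using hc), if_pos hc]
    · have hz : List.flatMap (pvExpand (PySem.Set.ofList keep) d 0) (pvLookup d h) = [] :=
        List.flatMap_eq_nil_iff.mpr (fun x _ => rfl)
      rw [if_pos (by simpa using hc), if_neg hc, hz,
        show pvUpdA keep d 0 (pvChildren d h) = [] from rfl]
  | succ f ih =>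
    intro xs
    rw [pvUpdA_succ, pv_dedup_flatMap, pv_dedup_flatMap]
    apply PySem.List.foldl_congr_mem
    intro t h _
    rw [pvExpand, pv_contains_ofList]
    by_cases hc : keep.contains h = true
    · rw [if_neg (by simpa using hc), if_pos hc]
    · rw [if_pos (by simpa using hc), if_neg hc, pvChildren_eq, ih (pvLookup d h)]
      exact pv_update_dedup t _

-- ----- B-side characterisation -----

-- B's loop computes the (fully expanded) flat substitution, pass by pass
theorem pv_runB_eq (xs keep : List String) (d : List (String × List String))
    (hpre : Pre_update_hyps_after_pruning xs keep d) :
    ∀ (k : Nat) (lst : List String),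
      (∀ c ∈ lst, c ∈ pvReachAll xs keep d) →
      (∀ c ∈ lst, keep.contains c = false → pvMu keep d c < k) →
      ∀ f, k ≤ f →
        pvRunB (PySem.Set.ofList keep) d f lst =
          lst.flatMap (pvExpT (PySem.Set.ofList keep) d (d.length + 2)) := by
  -- a list of kept CUIs is already the expansion
  have hkeptid : ∀ (lst : List String),
      (∀ c ∈ lst, keep.contains c = true) →
      lst.flatMap (pvExpT (PySem.Set.ofList keep) d (d.length + 2)) = lst := by
    intro lst hall
    rw [pv_flatMap_congr (g := fun c => [c]) ?_, List.flatMap_singleton' lst]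
    intro c hc
    simp [pvExpT, List.mem_of_elem_eq_true (hall c hc)]
  -- one substitution pass keeps the full expansion unchanged
  have hpass : ∀ (lst : List String), (∀ c ∈ lst, c ∈ pvReachAll xs keep d) →
      (pvSubstPass (PySem.Set.ofList keep) d lst).flatMap
          (pvExpT (PySem.Set.ofList keep) d (d.length + 2)) =
        lst.flatMap (pvExpT (PySem.Set.ofList keep) d (d.length + 2)) := by
    intro lst h1
    rw [pvSubstPass, List.flatMap_assoc]
    apply pv_flatMap_congr
    intro c hc
    by_cases hk : keep.contains c = true
    · have hm : c ∈ keep := List.mem_of_elem_eq_true hk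
      simp [hm]
    · have hknf : keep.contains c = false := by simpa using hk
      rw [if_neg (by rw [pv_contains_ofList]; simpa using hk), pvChildren_eq,
        show pvExpT (PySem.Set.ofList keep) d (d.length + 2) c =
            (pvLookup d c).flatMap (pvExpT (PySem.Set.ofList keep) d (d.length + 1)) by
          rw [pvExpT, pv_contains_ofList, hknf]; rfl]
      apply pv_flatMap_congr
      intro c' hc'
      have hc'R : c' ∈ pvReachAll xs keep d := pv_reachAll_children (h1 c hc) hknf hc'
      have hmu : pvMu keep d c' ≤ d.length := pvMu_le keep d c'
      have h2 := pv_main xs keep d hpre (pvMu keep d c' + 1) c' hc'R (by omega)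
      rw [(h2 (d.length + 2) (by omega)).1, (h2 (d.length + 1) (by omega)).1]
  intro k
  induction k with
  | zero =>
      intro lst h1 h2 f _
      have hall : ∀ c ∈ lst, keep.contains c = true := by
        intro c hc
        by_contra hk
        exact absurd (h2 c hc (by simpa using hk)) (by omega)
      have hrun : pvRunB (PySem.Set.ofList keep) d f lst = lst := by
        match f with
        | 0 => rfl
        | f' + 1 =>
            rw [pvRunB, if_pos]
            apply List.all_eq_true.mpr
            intro c hc
            rw [pv_contains_ofList]
            exact hall c hc
      rw [hrun, hkeptid lst hall]
  | succ k ih =>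
      intro lst h1 h2 f hf
      match f, hf with
      | f' + 1, hf =>
        by_cases hall : lst.all (fun c => PySem.Set.contains (PySem.Set.ofList keep) c) = true
        · have hallk : ∀ c ∈ lst, keep.contains c = true := by
            intro c hc
            rw [← pv_contains_ofList]
            exact List.all_eq_true.mp hall c hc
          rw [pvRunB, if_pos hall, hkeptid lst hallk]
        · rw [pvRunB, if_neg hall]
          rw [ih (pvSubstPass (PySem.Set.ofList keep) d lst) ?_ ?_ f' (by omega),
            hpass lst h1]
          · -- members of the pass stay reachable
            intro c' hc'
            rcases List.mem_flatMap.mp hc' with ⟨c, hc, hmem⟩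
            by_cases hk : keep.contains c = true
            · rw [if_pos (by rw [pv_contains_ofList]; exact hk)] at hmem
              rw [List.mem_singleton.mp hmem]
              exact h1 c hc
            · have hknf : keep.contains c = false := by simpa using hk
              rw [if_neg (by rw [pv_contains_ofList]; simpa using hk), pvChildren_eq] at hmem
              exact pv_reachAll_children (h1 c hc) hknf hmem
          · -- pruned members of the pass dropped in measure
            intro c' hc' hk'
            rcases List.mem_flatMap.mp hc' with ⟨c, hc, hmem⟩
            by_cases hk : keep.contains c = true
            · rw [if_pos (by rw [pv_contains_ofList]; exact hk)] at hmem
              rw [List.mem_singleton.mp hmem] at hk'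
              rw [hk'] at hk
              cases hk
            · have hknf : keep.contains c = false := by simpa using hk
              rw [if_neg (by rw [pv_contains_ofList]; simpa using hk), pvChildren_eq] at hmem
              have := pv_mu_dec hpre (h1 c hc) hknf hmem
              have := h2 c hc hknf
              omega

-- ===== VERDICT (by name: the statement is the Claim_ definition above) =====
theorem update_hyps_after_pruning_spec : Claim_equal_update_hyps_after_pruning := by
  intro xs keep d _ hpre
  unfold Spec_update_hyps_after_pruning update_hyps_after_pruning update_hyps_after_pruning_alt
  rw [pv_runB_eq xs keep d hpre (d.length + 1) xs
      (fun c hc => pv_mem_reachAll_of_mem hc)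
      (fun c hc _ => by have := pvMu_le keep d c; omega)
      (d.length + 2) (by omega),
    show d.length + 2 = (d.length + 1) + 1 from rfl,
    pv_updA_eq_dedup_flatMap keep d (d.length + 1) xs]
  congr 1
  apply pv_flatMap_congr
  intro c hc
  by_cases hk : keep.contains c = true
  · have hm : c ∈ keep := List.mem_of_elem_eq_true hk
    simp [pvExpand, pvExpT, hm]
  · have hknf : keep.contains c = false := by simpa using hk
    have h2 := pv_main xs keep d hpre (pvMu keep d c + 1) c
      (pv_mem_reachAll_of_mem hc) (by omega)
    have hmu := pvMu_le keep d c
    rw [(h2 ((d.length + 1) + 1) (by omega)).2, (h2 ((d.length + 1) + 1) (by omega)).1]
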